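-- pv_equiv track=rewrite | github.com/je488/Algorithm-Study | 백준/BOJ_20327.py | op8
-- ===== SOURCE A (Python) =====
-- def op8(a, l):
--     n = len(a)
--     ans = [[0] * n for _ in range(n)]
--     sub_size = (1 << l)
--     sub_count = n // sub_size
--     for i in range(sub_count):
--         for j in range(sub_count):
--             x1 = i * sub_size
--             y1 = j * sub_size
--             x2 = j * sub_size
--             y2 = (sub_count-i-1) * sub_size
--             for x in range(sub_size):
--                 for y in range(sub_size):
--                     ans[x1+x][y1+y] = a[x2+x][y2+y]
--     return ans
-- ===== SOURCE B (Python) =====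
-- # The operation is a 90-degree counter-clockwise rotation of the grid of
-- # sub_size x sub_size blocks: carve the matrix into blocks, rotate the block
-- # grid, and reassemble rows by concatenation with zero padding (alternative
-- # decomposition; same cost). Return value only; `a` is never mutated.
-- def op8(a, l):
--     n = len(a)
--     s = 1 << l
--     sc = n // s
--     m = sc * s
--     # carve into an sc x sc grid of s x s blocks (copied submatrices)
--     blocks = [[[a[i * s + r][j * s:(j + 1) * s] for r in range(s)]
--                for j in range(sc)] for i in range(sc)]
--     # rotate the block grid 90 degrees counter-clockwise
--     rotated = [[blocks[j][sc - 1 - i] for j in range(sc)] for i in range(sc)]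
--     # reassemble: concatenate block rows, pad right and bottom with zeros
--     out = []
--     for brow in rotated:
--         for r in range(s):
--             line = []
--             for blk in brow:
--                 line += blk[r]
--             out.append(line + [0] * (n - m))
--     out += [[0] * n for _ in range(n - m)]
--     return out
-- ===== Notes on version B (the rewrite author's own statement) =====
-- stated objective: alternative
-- what changed: Replaces A's four-deep index-arithmetic cell-by-cell copy with a carve-into-blocks / rotate-the-block-grid-counter-clockwise / reassemble-by-row-concatenation pipeline over whole blocks.
import Mathlib
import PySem

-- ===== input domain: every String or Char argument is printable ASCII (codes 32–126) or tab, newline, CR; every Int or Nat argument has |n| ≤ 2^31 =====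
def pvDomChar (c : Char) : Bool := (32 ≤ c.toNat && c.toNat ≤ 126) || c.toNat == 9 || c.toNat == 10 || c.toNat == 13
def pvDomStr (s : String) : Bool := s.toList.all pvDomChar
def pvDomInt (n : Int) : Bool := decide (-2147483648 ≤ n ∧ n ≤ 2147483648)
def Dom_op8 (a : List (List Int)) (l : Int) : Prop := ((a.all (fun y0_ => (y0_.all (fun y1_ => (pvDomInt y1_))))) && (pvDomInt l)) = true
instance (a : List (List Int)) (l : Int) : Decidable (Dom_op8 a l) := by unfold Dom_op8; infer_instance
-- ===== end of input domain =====

-- B rebuilds the result as carve-into-blocks / rotate-the-block-grid / reassemble-by-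
-- concatenation instead of A's four-deep index-arithmetic cell copy (alternative
-- decomposition, same cost); equivalence is about the return value (`a` is never mutated).

-- ===== PORT A =====
-- All reads a[x2+x][y2+y] and writes ans[x1+x][y1+y] are in range under Pre_op8,
-- so getD / modify / set are exact for Python's indexing there.
def op8 (a : List (List Int)) (l : Int) : List (List Int) :=
  let n := a.length
  let ans := List.replicate n (List.replicate n (0:Int))
  let s := 1 <<< l.toNat            -- sub_size = 1 << l  (0 ≤ l under Pre_op8)
  let sc := n / s                   -- sub_count = n // sub_size (both sides nonneg)
  (List.range sc).foldl (fun g i =>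
    (List.range sc).foldl (fun g j =>
      (List.range s).foldl (fun g x =>
        (List.range s).foldl (fun g y =>
          g.modify (i*s + x) (fun row => row.set (j*s + y)
            ((a.getD (j*s + x) []).getD ((sc - i - 1)*s + y) 0))) g) g) g) ans

-- ===== PORT B =====
-- carve into blocks (Python slices via PySem.List.slice), rotate the block grid
-- counter-clockwise, reassemble rows by concatenation, pad right and bottom with zeros.
-- blocks[j][sc-1-i] and blk[r] are always in range, so getD is exact there.
def op8_alt (a : List (List Int)) (l : Int) : List (List Int) :=
  let n := a.length
  let s := 1 <<< l.toNat
  let sc := n / s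
  let m := sc * s
  let blocks := (List.range sc).map (fun i => (List.range sc).map (fun j =>
      (List.range s).map (fun r =>
        PySem.List.slice (a.getD (i*s + r) []) (some ((j*s : Nat) : Int)) (some (((j+1)*s : Nat) : Int)))))
  let rotated := (List.range sc).map (fun i => (List.range sc).map (fun j =>
      (blocks.getD j []).getD (sc - 1 - i) []))
  let body := rotated.foldl (fun out brow =>
      (List.range s).foldl (fun out r =>
        out ++ [(brow.foldl (fun line blk => line ++ blk.getD r []) []) ++ List.replicate (n - m) (0:Int)]) out) []
  body ++ (List.range (n - m)).map (fun _ => List.replicate n (0:Int))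

-- ===== PRECONDITION & SPEC =====
-- Pre_op8 holds exactly where Python A returns: l < 0 makes "1 << l" raise ValueError,
-- and a row among the first sub_count*sub_size rows shorter than sub_count*sub_size
-- makes the read a[x2+x][y2+y] raise IndexError.
def Pre_op8 (a : List (List Int)) (l : Int) : Prop :=
  0 ≤ l ∧ ∀ row ∈ a.take (a.length / (1 <<< l.toNat) * (1 <<< l.toNat)),
    a.length / (1 <<< l.toNat) * (1 <<< l.toNat) ≤ row.length
instance (a : List (List Int)) (l : Int) : Decidable (Pre_op8 a l) := by unfold Pre_op8; infer_instance
def pvWitness_op8 : List (List Int) × Int := ([[1, 2], [3, 4]], 0)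

def Spec_op8 (a : List (List Int)) (l : Int) (out : List (List Int)) : Prop := out = op8_alt a l
instance (a : List (List Int)) (l : Int) (out : List (List Int)) : Decidable (Spec_op8 a l out) := by unfold Spec_op8; infer_instance

-- ===== CLAIM (what is proved, stated in full; the proofs are below) =====
def Claim_equal_op8 : Prop := ∀ (a : List (List Int)) (l : Int), Dom_op8 a l → Pre_op8 a l → Spec_op8 a l (op8 a l)

-- ===== LEMMAS AND PROOFS =====

-- abbreviations for the block geometry of both programs
def pvS (l : Int) : Nat := 1 <<< l.toNat
def pvSC (a : List (List Int)) (l : Int) : Nat := a.length / pvS l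
def pvM (a : List (List Int)) (l : Int) : Nat := pvSC a l * pvS l
-- the value both programs place at cell (X, Y) of the covered region
def pvV (a : List (List Int)) (l : Int) (X Y : Nat) : Int :=
  (a.getD ((Y / pvS l) * pvS l + X % pvS l) []).getD ((pvSC a l - X / pvS l - 1) * pvS l + Y % pvS l) 0
-- the common closed-form grid
def pvF (a : List (List Int)) (l : Int) : List (List Int) :=
  (List.range a.length).map (fun X => (List.range a.length).map (fun Y =>
    if X < pvM a l ∧ Y < pvM a l then pvV a l X Y else 0))

-- mutable-grid machinery for the A side
def pvGet2 (g : List (List Int)) (X Y : Nat) : Int := (g.getD X []).getD Y 0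
def pvSet2 (g : List (List Int)) (X Y : Nat) (v : Int) : List (List Int) :=
  g.modify X (fun row => row.set Y v)
def pvShape (n : Nat) (g : List (List Int)) : Prop :=
  g.length = n ∧ ∀ X, X < n → (g.getD X []).length = n
def pvRun (W : List ((Nat × Nat) × Int)) (g : List (List Int)) : List (List Int) :=
  W.foldl (fun g w => pvSet2 g w.1.1 w.1.2 w.2) g
-- A's write sequence
def pvW (a : List (List Int)) (l : Int) : List ((Nat × Nat) × Int) :=
  (List.range (pvSC a l)).flatMap (fun i => (List.range (pvSC a l)).flatMap (fun j =>
    (List.range (pvS l)).flatMap (fun x => (List.range (pvS l)).map (fun y =>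
      ((i * pvS l + x, j * pvS l + y),
        (a.getD (j * pvS l + x) []).getD ((pvSC a l - i - 1) * pvS l + y) 0)))))

theorem pvS_pos (l : Int) : 0 < pvS l := by
  simp [pvS, Nat.one_shiftLeft]

theorem pvM_le (a : List (List Int)) (l : Int) : pvM a l ≤ a.length :=
  Nat.div_mul_le_self _ _

theorem pvDivMod {s i x : Nat} (hx : x < s) : (i * s + x) / s = i ∧ (i * s + x) % s = x := by
  constructor
  · rw [Nat.mul_comm i s, Nat.mul_add_div (by omega)]
    simp [Nat.div_eq_of_lt hx]
  · rw [Nat.mul_comm i s, Nat.mul_add_mod]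
    exact Nat.mod_eq_of_lt hx

theorem pvBlockLt {s sc i x : Nat} (hi : i < sc) (hx : x < s) : i * s + x < sc * s := by
  calc i * s + x < (i + 1) * s := by rw [Nat.succ_mul]; omega
  _ ≤ sc * s := Nat.mul_le_mul_right s (by omega)

theorem pvShape_set2 {n : Nat} {g : List (List Int)} {X Y : Nat} {v : Int}
    (h : pvShape n g) : pvShape n (pvSet2 g X Y v) := by
  obtain ⟨h1, h2⟩ := h
  refine ⟨by simp [pvSet2, h1], fun X' hX' => ?_⟩
  simp only [pvSet2, List.getD_eq_getElem?_getD, List.getElem?_modify]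
  by_cases hXX : X = X'
  · subst hXX
    cases hg : g[X]? with
    | none => have := h2 X hX'; simp [List.getD_eq_getElem?_getD, hg] at this ⊢; simpa using this
    | some row =>
      have := h2 X hX'
      simp [List.getD_eq_getElem?_getD, hg] at this
      simpa using this
  · simp [hXX, ← List.getD_eq_getElem?_getD]
    exact h2 X' hX'

theorem pvGet2_set2 {g : List (List Int)} {X Y : Nat} {v : Int}
    (hX : X < g.length) (hY : Y < (g.getD X []).length) (X' Y' : Nat) :
    pvGet2 (pvSet2 g X Y v) X' Y' = if X = X' ∧ Y = Y' then v else pvGet2 g X' Y' := by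
  have hg : g[X]? = some g[X] := List.getElem?_eq_getElem hX
  have hrow : g.getD X [] = g[X] := by simp [List.getD_eq_getElem?_getD, hg]
  simp only [pvGet2, pvSet2, List.getD_eq_getElem?_getD, List.getElem?_modify]
  by_cases hXX : X = X'
  · subst hXX
    simp only [hg]
    by_cases hYY : Y = Y'
    · subst hYY
      simp [hrow ▸ hY]
    · simp [hYY]
  · simp [hXX]

theorem pvShape_run {n : Nat} (W : List ((Nat × Nat) × Int)) {g : List (List Int)}
    (h : pvShape n g) : pvShape n (pvRun W g) := by
  induction W generalizing g with
  | nil => exact h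
  | cons w W ih => exact ih (pvShape_set2 h)

theorem pvGet2_run {n : Nat} (W : List ((Nat × Nat) × Int)) {g : List (List Int)}
    (hsh : pvShape n g) (hin : ∀ w ∈ W, w.1.1 < n ∧ w.1.2 < n)
    (hnd : (W.map Prod.fst).Nodup) (X Y : Nat) :
    pvGet2 (pvRun W g) X Y =
      ((W.find? (fun w => w.1 == (X, Y))).map Prod.snd).getD (pvGet2 g X Y) := by
  induction W generalizing g with
  | nil => simp [pvRun]
  | cons w W ih =>
    have hw := hin w (by simp)
    have hX : w.1.1 < g.length := hsh.1 ▸ hw.1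
    have hY : w.1.2 < (g.getD w.1.1 []).length := by rw [hsh.2 w.1.1 hw.1]; exact hw.2
    have hrun : pvRun (w :: W) g = pvRun W (pvSet2 g w.1.1 w.1.2 w.2) := rfl
    rw [hrun, ih (pvShape_set2 hsh) (fun w' hw' => hin w' (by simp [hw'])) hnd.of_cons]
    by_cases hpos : w.1 = (X, Y)
    · rw [Prod.ext_iff] at hpos
      obtain ⟨hx1, hy1⟩ := hpos
      subst hx1; subst hy1
      have hfindW : W.find? (fun w' => w'.1 == (w.1.1, w.1.2)) = none := by
        apply List.find?_eq_none.mpr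
        intro w' hw'
        simp only [beq_iff_eq]
        intro hc
        have : w.1 ∈ W.map Prod.fst := by
          have : w'.1 ∈ W.map Prod.fst := List.mem_map_of_mem hw'
          rwa [hc] at this
        exact (List.nodup_cons.mp hnd).1 this
      rw [hfindW]
      simp only [List.find?_cons, Option.map_none, Option.getD_none]
      rw [pvGet2_set2 hX hY]
      simp
    · have : (w.1 == (X, Y)) = false := by simpa using hpos
      simp only [List.find?_cons, this]
      congr 1
      rw [pvGet2_set2 hX hY]
      have : ¬(w.1.1 = X ∧ w.1.2 = Y) := by
        intro ⟨h1, h2⟩; exact hpos (Prod.ext h1 h2)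
      simp [this]

theorem pvFind?_unique {β : Type} {L : List β} {p : β → Bool} {b0 : β}
    (hmem : b0 ∈ L) (hb : p b0) (huniq : ∀ b ∈ L, p b → b = b0) : L.find? p = some b0 := by
  induction L with
  | nil => simp at hmem
  | cons b L ih =>
    by_cases hpb : p b
    · have : b = b0 := huniq b (by simp) hpb
      simp [this, hb]
    · have hm : b0 ∈ L := by
        rcases List.mem_cons.mp hmem with h | h
        · exact absurd (h ▸ hb) (by simpa using hpb)
        · exact h
      simp only [List.find?_cons, Bool.of_not_eq_true hpb]
      exact ih hm (fun b' hb' => huniq b' (by simp [hb']))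

theorem pvNodupFlatMap {β : Type} {c : Nat} {f : Nat → List β}
    (h1 : ∀ i, i < c → (f i).Nodup)
    (h2 : ∀ i j, i < c → j < c → i < j → ∀ b, b ∈ f i → b ∉ f j) :
    ((List.range c).flatMap f).Nodup := by
  induction c with
  | zero => simp [List.range_zero]
  | succ c ih =>
    rw [List.range_succ, List.flatMap_append, List.nodup_append]
    refine ⟨ih (fun i hi => h1 i (by omega)) (fun i j hi hj hij => h2 i j (by omega) (by omega) hij), ?_, ?_⟩
    · show (List.flatMap f [c]).Nodup
      rw [List.flatMap_cons, List.flatMap_nil, List.append_nil]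
      exact h1 c (by omega)
    · intro b hb b' hb' heq
      subst heq
      simp only [List.mem_flatMap, List.mem_range] at hb
      obtain ⟨i, hi, hbi⟩ := hb
      have hb2 : b ∈ f c := by
        rcases List.mem_flatMap.mp hb' with ⟨j, hj, hbj⟩
        simp only [List.mem_singleton] at hj
        rwa [hj] at hbj
      exact h2 i c (by omega) (by omega) hi b hbi hb2

theorem pvW_in (a : List (List Int)) (l : Int) :
    ∀ w ∈ pvW a l, w.1.1 < a.length ∧ w.1.2 < a.length := by
  intro w hw
  simp only [pvW, List.mem_flatMap, List.mem_map, List.mem_range] at hw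
  obtain ⟨i, hi, j, hj, x, hx, y, hy, rfl⟩ := hw
  have h1 := pvBlockLt hi hx
  have h2 := pvBlockLt hj hy
  have h3 := pvM_le a l
  simp only [pvM] at h3
  exact ⟨by simpa using lt_of_lt_of_le h1 h3, by simpa using lt_of_lt_of_le h2 h3⟩

theorem pvW_nodup (a : List (List Int)) (l : Int) : ((pvW a l).map Prod.fst).Nodup := by
  have hs := pvS_pos l
  simp only [pvW, List.map_flatMap, List.map_map]
  apply pvNodupFlatMap
  · intro i _
    apply pvNodupFlatMap
    · intro j _
      apply pvNodupFlatMap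
      · intro x _
        apply List.Nodup.map ?_ (List.nodup_range)
        intro y y' h
        simp only [Function.comp, Prod.mk.injEq] at h
        omega
      · intro x x' _ _ hxx b hb hb'
        simp only [List.mem_map, Function.comp, List.mem_range] at hb hb'
        obtain ⟨y, hy, rfl⟩ := hb
        obtain ⟨y', hy', hc⟩ := hb'
        simp only [Prod.mk.injEq] at hc
        omega
    · intro j j' _ _ hjj b hb hb'
      simp only [List.mem_flatMap, List.mem_map, Function.comp, List.mem_range] at hb hb'
      obtain ⟨x, hx, y, hy, rfl⟩ := hb
      obtain ⟨x', hx', y', hy', hc⟩ := hb'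
      simp only [Prod.mk.injEq] at hc
      have e1 : (j * pvS l + y) / pvS l = j := (pvDivMod hy).1
      have e2 : (j' * pvS l + y') / pvS l = j' := (pvDivMod hy').1
      rw [hc.2] at e2
      omega
  · intro i i' _ _ hii b hb hb'
    simp only [List.mem_flatMap, List.mem_map, Function.comp, List.mem_range] at hb hb'
    obtain ⟨j, hj, x, hx, y, hy, rfl⟩ := hb
    obtain ⟨j', hj', x', hx', y', hy', hc⟩ := hb'
    simp only [Prod.mk.injEq] at hc
    have e1 : (i * pvS l + x) / pvS l = i := (pvDivMod hx).1
    have e2 : (i' * pvS l + x') / pvS l = i' := (pvDivMod hx').1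
    rw [hc.1] at e2
    omega

theorem pvOp8_eq_run (a : List (List Int)) (l : Int) :
    op8 a l = pvRun (pvW a l) (List.replicate a.length (List.replicate a.length 0)) := by
  simp only [op8, pvRun, pvW, pvSet2, pvS, pvSC, List.foldl_flatMap, List.foldl_map]

theorem pvRepl_shape (n : Nat) : pvShape n (List.replicate n (List.replicate n (0:Int))) := by
  refine ⟨by simp, fun X hX => ?_⟩
  simp [List.getD_eq_getElem?_getD, hX]

theorem pvGet2_repl (n X Y : Nat) :
    pvGet2 (List.replicate n (List.replicate n (0:Int))) X Y = 0 := by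
  simp only [pvGet2, List.getD_eq_getElem?_getD, List.getElem?_replicate]
  split
  · simp [List.getElem?_replicate]
    split <;> simp
  · simp

theorem pvW_inM (a : List (List Int)) (l : Int) :
    ∀ w ∈ pvW a l, w.1.1 < pvM a l ∧ w.1.2 < pvM a l := by
  intro w hw
  simp only [pvW, List.mem_flatMap, List.mem_map, List.mem_range] at hw
  obtain ⟨i, hi, j, hj, x, hx, y, hy, rfl⟩ := hw
  exact ⟨pvBlockLt hi hx, pvBlockLt hj hy⟩

theorem pvA_shape (a : List (List Int)) (l : Int) : pvShape a.length (op8 a l) := by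
  rw [pvOp8_eq_run]
  exact pvShape_run _ (pvRepl_shape a.length)

theorem pvA_char (a : List (List Int)) (l : Int) (X Y : Nat) :
    pvGet2 (op8 a l) X Y = if X < pvM a l ∧ Y < pvM a l then pvV a l X Y else 0 := by
  have hs := pvS_pos l
  rw [pvOp8_eq_run, pvGet2_run (pvW a l) (pvRepl_shape a.length) (pvW_in a l) (pvW_nodup a l)]
  by_cases hXY : X < pvM a l ∧ Y < pvM a l
  · obtain ⟨hX, hY⟩ := hXY
    have hfind : (pvW a l).find? (fun w => w.1 == (X, Y)) = some ((X, Y), pvV a l X Y) := by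
      apply pvFind?_unique
      · simp only [pvW, List.mem_flatMap, List.mem_map, List.mem_range]
        refine ⟨X / pvS l, (Nat.div_lt_iff_lt_mul hs).mpr (by simpa [pvM] using hX),
          Y / pvS l, (Nat.div_lt_iff_lt_mul hs).mpr (by simpa [pvM] using hY),
          X % pvS l, Nat.mod_lt _ hs, Y % pvS l, Nat.mod_lt _ hs, ?_⟩
        have eX : X / pvS l * pvS l + X % pvS l = X := by
          rw [Nat.mul_comm]; exact Nat.div_add_mod X (pvS l)
        have eY : Y / pvS l * pvS l + Y % pvS l = Y := by
          rw [Nat.mul_comm]; exact Nat.div_add_mod Y (pvS l)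
        simp [pvV, eX, eY]
      · simp
      · intro w hw hpw
        simp only [pvW, List.mem_flatMap, List.mem_map, List.mem_range] at hw
        obtain ⟨i, hi, j, hj, x, hx, y, hy, rfl⟩ := hw
        simp only [beq_iff_eq, Prod.mk.injEq] at hpw
        obtain ⟨hpx, hpy⟩ := hpw
        have di : X / pvS l = i := by rw [← hpx]; exact (pvDivMod hx).1
        have mi : X % pvS l = x := by rw [← hpx]; exact (pvDivMod hx).2
        have dj : Y / pvS l = j := by rw [← hpy]; exact (pvDivMod hy).1
        have mj : Y % pvS l = y := by rw [← hpy]; exact (pvDivMod hy).2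
        simp [pvV, hpx, hpy, di, mi, dj, mj]
    rw [hfind]
    simp [hX, hY]
  · have hfind : (pvW a l).find? (fun w => w.1 == (X, Y)) = none := by
      apply List.find?_eq_none.mpr
      intro w hw
      have := pvW_inM a l w hw
      simp only [beq_iff_eq]
      intro hc
      rw [hc] at this
      exact hXY ⟨this.1, this.2⟩
    rw [hfind]
    simp [hXY, pvGet2_repl]

-- generic collapse of a block double loop into one indexed loop
theorem pvCollapse {β : Type} (c s : Nat) (h : Nat → β) (_hs : 0 < s) :
    (List.range c).flatMap (fun i => (List.range s).map (fun x => h (i * s + x)))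
      = (List.range (c * s)).map h := by
  induction c with
  | zero => simp
  | succ c ih =>
    rw [List.range_succ, List.flatMap_append, ih, Nat.succ_mul, List.range_add, List.map_append]
    congr 1
    simp [List.flatMap_cons, List.map_map, Function.comp]

theorem pvSliceMap (row : List Int) (d k : Nat) (h : d + k ≤ row.length) :
    List.take k (List.drop d row) = (List.range k).map (fun y => row.getD (d + y) 0) := by
  apply List.ext_getElem (by simp; omega)
  intro i h1 h2
  have hd : d + i < row.length := by simp at h1; omega
  simp [List.getElem_take, List.getElem_drop, List.getD_eq_getElem?_getD,
    List.getElem?_eq_getElem hd]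

theorem pvPadGrid (m n : Nat) (hmn : m ≤ n) (v : Nat → Nat → Int) :
    (List.range n).map (fun X => (List.range n).map (fun Y => if X < m ∧ Y < m then v X Y else 0))
      = (List.range m).map (fun X => (List.range m).map (fun Y => v X Y) ++ List.replicate (n - m) 0)
        ++ (List.range (n - m)).map (fun _ => List.replicate n 0) := by
  obtain ⟨k, rfl⟩ : ∃ k, n = m + k := ⟨n - m, by omega⟩
  simp only [Nat.add_sub_cancel_left]
  rw [List.range_add, List.map_append]
  congr 1
  · apply List.map_congr_left
    intro X hX
    simp only [List.mem_range] at hX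
    rw [List.map_append]
    congr 1
    · apply List.map_congr_left
      intro Y hY
      simp only [List.mem_range] at hY
      simp [hX, hY]
    · rw [List.map_map]
      have h1 : ∀ Y ∈ List.range k,
          ((fun Y => if X < m ∧ Y < m then v X Y else 0) ∘ (fun x => m + x)) Y
            = (fun _ => (0:Int)) Y := by
        intro Y _
        simp only [Function.comp]
        simp
      rw [List.map_congr_left h1, List.map_const', List.length_range]
  · rw [List.map_map]
    apply List.map_congr_left
    intro X hX
    simp only [List.mem_range, Function.comp] at hX ⊢
    rw [List.map_append, List.replicate_add]
    congr 1
    · have h1 : ∀ Y ∈ List.range m,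
          (if m + X < m ∧ Y < m then v (m + X) Y else 0) = (fun _ => (0:Int)) Y := by
        intro Y _
        simp
      rw [List.map_congr_left h1, List.map_const', List.length_range]
    · rw [List.map_map]
      have h1 : ∀ Y ∈ List.range k,
          ((fun Y => if m + X < m ∧ Y < m then v (m + X) Y else 0) ∘ (fun x => m + x)) Y
            = (fun _ => (0:Int)) Y := by
        intro Y _
        simp only [Function.comp]
        simp
      rw [List.map_congr_left h1, List.map_const', List.length_range]

theorem pvB_eq_F (a : List (List Int)) (l : Int) (hpre : Pre_op8 a l) :
    op8_alt a l = pvF a l := by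
  obtain ⟨hl, hrows⟩ := hpre
  have hs : 0 < pvS l := pvS_pos l
  have hmn : pvM a l ≤ a.length := pvM_le a l
  have hrowlen : ∀ X, X < pvM a l → pvM a l ≤ (a.getD X []).length := by
    intro X hX
    have hXn : X < a.length := lt_of_lt_of_le hX hmn
    rw [List.getD_eq_getElem _ _ hXn]
    apply hrows
    have hXt : X < (a.take (pvM a l)).length := by simp; omega
    have hm := List.getElem_mem hXt
    rwa [List.getElem_take] at hm
  have hblockentry : ∀ p q r, p < pvSC a l → q < pvSC a l → r < pvS l →
      PySem.List.slice (a.getD (p * pvS l + r) []) (some ((q * pvS l : Nat) : Int))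
          (some (((q + 1) * pvS l : Nat) : Int))
        = (List.range (pvS l)).map (fun y => (a.getD (p * pvS l + r) []).getD (q * pvS l + y) 0) := by
    intro p q r hp hq hr
    rw [PySem.List.slice_natCast]
    have e : (q + 1) * pvS l - q * pvS l = pvS l := by rw [Nat.succ_mul]; omega
    rw [e]
    apply pvSliceMap
    have h1 : p * pvS l + r < pvM a l := pvBlockLt hp hr
    have h2 := hrowlen _ h1
    have h3 : (q + 1) * pvS l ≤ pvM a l := Nat.mul_le_mul_right _ (by omega)
    rw [Nat.succ_mul] at h3
    omega
  have hmain : op8_alt a l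
      = (List.range (pvM a l)).map (fun X =>
          (List.range (pvM a l)).map (fun Y => pvV a l X Y)
            ++ List.replicate (a.length - pvM a l) 0)
        ++ (List.range (a.length - pvM a l)).map (fun _ => List.replicate a.length 0) := by
    simp only [op8_alt]
    simp only [PySem.List.foldl_append_singleton_eq_map]
    simp only [PySem.List.foldl_append_eq_flatMap]
    simp only [List.nil_append, List.flatMap_map]
    rw [show (1 <<< l.toNat) = pvS l from rfl]
    rw [show a.length / pvS l = pvSC a l from rfl]
    rw [show pvM a l = pvSC a l * pvS l from rfl]
    congr 1
    rw [← pvCollapse (pvSC a l) (pvS l)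
      (fun X => (List.range (pvSC a l * pvS l)).map (fun Y => pvV a l X Y)
        ++ List.replicate (a.length - pvSC a l * pvS l) 0) hs]
    apply List.flatMap_congr
    intro i hi
    simp only [List.mem_range] at hi
    apply List.map_congr_left
    intro r hr
    simp only [List.mem_range] at hr
    congr 1
    have hinner : ∀ j, j < pvSC a l →
        ((((List.range (pvSC a l)).map (fun i => (List.range (pvSC a l)).map (fun j =>
            (List.range (pvS l)).map (fun r =>
              PySem.List.slice (a.getD (i * pvS l + r) []) (some ((j * pvS l : Nat) : Int))
                (some (((j + 1) * pvS l : Nat) : Int)))))).getD j []).getD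
                  (pvSC a l - 1 - i) []).getD r []
          = (List.range (pvS l)).map (fun y =>
              (a.getD (j * pvS l + r) []).getD ((pvSC a l - 1 - i) * pvS l + y) 0) := by
      intro j hj
      rw [PySem.List.getD_map_range _ _ _ _ hj,
        PySem.List.getD_map_range _ _ _ _ (show pvSC a l - 1 - i < pvSC a l by omega),
        PySem.List.getD_map_range _ _ _ _ hr,
        hblockentry j (pvSC a l - 1 - i) r hj (by omega) hr]
    rw [List.flatMap_congr (fun j hj => hinner j (List.mem_range.mp hj))]
    rw [← pvCollapse (pvSC a l) (pvS l) (fun Y => pvV a l (i * pvS l + r) Y) hs]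
    apply List.flatMap_congr
    intro j hj
    simp only [List.mem_range] at hj
    apply List.map_congr_left
    intro y hy
    simp only [List.mem_range] at hy
    have d1 : (j * pvS l + y) / pvS l = j := (pvDivMod hy).1
    have m1 : (j * pvS l + y) % pvS l = y := (pvDivMod hy).2
    have d2 : (i * pvS l + r) / pvS l = i := (pvDivMod hr).1
    have m2 : (i * pvS l + r) % pvS l = r := (pvDivMod hr).2
    rw [show pvSC a l - 1 - i = pvSC a l - i - 1 from by omega]
    simp [pvV, d1, m1, d2, m2]
  rw [hmain, pvF, pvPadGrid (pvM a l) a.length hmn (pvV a l)]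

theorem pvF_shape (a : List (List Int)) (l : Int) : pvShape a.length (pvF a l) := by
  refine ⟨by simp [pvF], fun X hX => ?_⟩
  rw [pvF, PySem.List.getD_map_range _ _ _ _ hX]
  simp

theorem pvF_char (a : List (List Int)) (l : Int) (X Y : Nat) :
    pvGet2 (pvF a l) X Y = if X < pvM a l ∧ Y < pvM a l then pvV a l X Y else 0 := by
  have hmn := pvM_le a l
  by_cases hX : X < a.length
  · rw [pvGet2, pvF, PySem.List.getD_map_range _ _ _ _ hX]
    by_cases hY : Y < a.length
    · rw [PySem.List.getD_map_range _ _ _ _ hY]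
    · rw [List.getD_eq_getElem?_getD]
      have : ((List.range a.length).map fun Y =>
          if X < pvM a l ∧ Y < pvM a l then pvV a l X Y else 0)[Y]? = none := by
        apply List.getElem?_eq_none
        simpa using by omega
      rw [this]
      have : ¬(X < pvM a l ∧ Y < pvM a l) := by omega
      simp [this]
  · have h0 : (pvF a l)[X]? = none := by
      apply List.getElem?_eq_none
      simpa [pvF] using by omega
    have hrow : (pvF a l).getD X [] = [] := by
      rw [List.getD_eq_getElem?_getD, h0]; rfl
    rw [pvGet2, hrow]
    have : ¬(X < pvM a l ∧ Y < pvM a l) := by omega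
    simp [this]

theorem pvGrid_ext {n : Nat} {g g' : List (List Int)} (hg : pvShape n g) (hg' : pvShape n g')
    (h : ∀ X Y, X < n → Y < n → pvGet2 g X Y = pvGet2 g' X Y) : g = g' := by
  apply List.ext_getElem (by rw [hg.1, hg'.1])
  intro X h1 h2
  have hXn : X < n := hg.1 ▸ h1
  have hr : g.getD X [] = g[X] := List.getD_eq_getElem _ _ h1
  have hr' : g'.getD X [] = g'[X] := List.getD_eq_getElem _ _ h2
  apply List.ext_getElem (by rw [← hr, ← hr', hg.2 X hXn, hg'.2 X hXn])
  intro Y hY1 hY2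
  have hYn : Y < n := by rw [← hr, hg.2 X hXn] at hY1; exact hY1
  have := h X Y hXn hYn
  rw [pvGet2, pvGet2, hr, hr', List.getD_eq_getElem _ _ hY1, List.getD_eq_getElem _ _ hY2] at this
  exact this

-- ===== VERDICT (by name: the statement is the Claim_ definition above) =====
theorem op8_spec : Claim_equal_op8 := by
  intro a l _ hpre
  unfold Spec_op8
  rw [pvB_eq_F a l hpre]
  exact pvGrid_ext (pvA_shape a l) (pvF_shape a l)
    (fun X Y _ _ => by rw [pvA_char, pvF_char])
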